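-- pv_equiv track=rewrite | github.com/arifulislam514/Jarvis-Ai | Backend/Automation.py | parse_email_command
-- ===== SOURCE A (Python) =====
-- def parse_email_command(command: str):
--     """
--     Expected format:
--       email to someone@site.com | subject Hello | body This is the message | cc a@x.com,b@y.com | bcc c@z.com
--     """
--     raw = command.strip()
--     # remove leading "email " or "send email "
--     raw = raw.removeprefix("send email ").removeprefix("email ").strip()
--
--     parts = [p.strip() for p in raw.split("|") if p.strip()]
--     data = {"to": "", "subject": "", "body": "", "cc": "", "bcc": ""}
--
--     for p in parts:
--         lower = p.lower()
--         if lower.startswith("to "):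
--             data["to"] = p[3:].strip()
--         elif lower.startswith("subject "):
--             data["subject"] = p[8:].strip()
--         elif lower.startswith("body "):
--             data["body"] = p[5:].strip()
--         elif lower.startswith("cc "):
--             data["cc"] = p[3:].strip()
--         elif lower.startswith("bcc "):
--             data["bcc"] = p[4:].strip()
--
--     # also support: "to someone@x.com" without the pipe
--     if not data["to"] and raw.lower().startswith("to "):
--         data["to"] = raw[3:].strip()
--
--     if not data["to"] or not data["subject"] or not data["body"]:
--         return None, "Email command needs: to, subject, body. Example: email to a@b.com | subject Hi | body Hello"
--     return data, None
-- ===== SOURCE B (Python) =====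
-- FIELDS = ("to", "subject", "body", "cc", "bcc")
--
--
-- def parse_email_command(command: str):
--     raw = command.strip().removeprefix("send email ").removeprefix("email ").strip()
--     parts = [p.strip() for p in raw.split("|") if p.strip()]
--
--     def last_match(key):
--         # scan backwards: the first match from the end is A's "last write wins"
--         kl = key + " "
--         for p in reversed(parts):
--             if p.lower().startswith(kl):
--                 return p[len(kl):].strip()
--         return ""
--
--     data = {k: last_match(k) for k in FIELDS}
--     if not data["to"] and raw.lower().startswith("to "):
--         data["to"] = raw[3:].strip()
--     if not (data["to"] and data["subject"] and data["body"]):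
--         return None, "Email command needs: to, subject, body. Example: email to a@b.com | subject Hi | body Hello"
--     return data, None
-- ===== Notes on version B (the rewrite author's own statement) =====
-- stated objective: alternative
-- what changed: Instead of A's single forward pass mutating a dict through a five-branch elif chain (last write wins), B computes each field independently by a backward scan over the parts (first match from the end), so there is no mutable accumulator and no branch chain; this agrees with the elif chain because the five field prefixes are mutually non-prefixing.
import Mathlib
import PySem

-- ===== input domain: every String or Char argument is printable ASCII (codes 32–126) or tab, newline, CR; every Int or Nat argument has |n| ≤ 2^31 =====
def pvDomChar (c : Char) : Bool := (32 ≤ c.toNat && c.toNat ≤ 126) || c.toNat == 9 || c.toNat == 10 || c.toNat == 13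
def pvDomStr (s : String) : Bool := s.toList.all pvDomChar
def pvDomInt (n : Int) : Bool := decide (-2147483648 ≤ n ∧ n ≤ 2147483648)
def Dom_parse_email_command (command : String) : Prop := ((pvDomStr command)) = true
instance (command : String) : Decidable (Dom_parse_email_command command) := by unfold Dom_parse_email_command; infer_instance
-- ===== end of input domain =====

-- B replaces A's single forward pass (mutable dict + five-branch elif chain, last write wins)
-- by five independent backward scans over the parts, one per field (objective: alternative).

-- Python str.removeprefix (no PySem primitive; exact: drop the prefix iff present). Used by both ports.
def pvRemovePrefix (s p : List Char) : List Char :=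
  if PySem.Chars.startswith s p then s.drop p.length else s

-- ===== PORT A =====
-- loop body of A's 'for p in parts': the elif chain; p[3:] etc. (nonnegative literal slice) = List.drop
def pvStepA (d : PySem.Dict (List Char) (List Char)) (p : List Char) :
    PySem.Dict (List Char) (List Char) :=
  let lw := PySem.Chars.lower p
  if PySem.Chars.startswith lw "to ".toList then
    d.insert "to".toList (PySem.Chars.strip (p.drop 3))
  else if PySem.Chars.startswith lw "subject ".toList then
    d.insert "subject".toList (PySem.Chars.strip (p.drop 8))
  else if PySem.Chars.startswith lw "body ".toList then
    d.insert "body".toList (PySem.Chars.strip (p.drop 5))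
  else if PySem.Chars.startswith lw "cc ".toList then
    d.insert "cc".toList (PySem.Chars.strip (p.drop 3))
  else if PySem.Chars.startswith lw "bcc ".toList then
    d.insert "bcc".toList (PySem.Chars.strip (p.drop 4))
  else d

def parse_email_command (command : String) : (Option (List (String × String))) × Option String :=
  let raw := PySem.Chars.strip (pvRemovePrefix (pvRemovePrefix
      (PySem.Chars.strip command.toList) "send email ".toList) "email ".toList)
  let parts := ((PySem.Chars.splitOn raw ['|']).map PySem.Chars.strip).filter (fun p => !p.isEmpty)
  let data := parts.foldl pvStepA
      ⟨[("to".toList, []), ("subject".toList, []), ("body".toList, []), ("cc".toList, []), ("bcc".toList, [])]⟩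
  let data := if (data.getD "to".toList []).isEmpty
                 && PySem.Chars.startswith (PySem.Chars.lower raw) "to ".toList then
      data.insert "to".toList (PySem.Chars.strip (raw.drop 3))
    else data
  if (data.getD "to".toList []).isEmpty || (data.getD "subject".toList []).isEmpty
      || (data.getD "body".toList []).isEmpty then
    (none, some "Email command needs: to, subject, body. Example: email to a@b.com | subject Hi | body Hello")
  else
    (some (data.items.map (fun kv => (String.ofList kv.1, String.ofList kv.2))), none)

-- ===== PORT B =====
def pvFields : List (List Char) :=
  ["to".toList, "subject".toList, "body".toList, "cc".toList, "bcc".toList]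

-- B's 'last_match' helper: 'for p in reversed(parts): if p.lower().startswith(kl): return p[len(kl):].strip()';
-- called on parts.reverse, so the recursion IS the backward for-loop, first match from the end.
def pvScan (ps : List (List Char)) (kl : List Char) : List Char :=
  match ps with
  | [] => []
  | p :: t =>
    if PySem.Chars.startswith (PySem.Chars.lower p) kl then PySem.Chars.strip (p.drop kl.length)
    else pvScan t kl

def parse_email_command_alt (command : String) : (Option (List (String × String))) × Option String :=
  let raw := PySem.Chars.strip (pvRemovePrefix (pvRemovePrefix
      (PySem.Chars.strip command.toList) "send email ".toList) "email ".toList)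
  let parts := ((PySem.Chars.splitOn raw ['|']).map PySem.Chars.strip).filter (fun p => !p.isEmpty)
  let data : PySem.Dict (List Char) (List Char) :=
    ⟨pvFields.map (fun k => (k, pvScan parts.reverse (k ++ [' '])))⟩
  let data := if (data.getD "to".toList []).isEmpty
                 && PySem.Chars.startswith (PySem.Chars.lower raw) "to ".toList then
      data.insert "to".toList (PySem.Chars.strip (raw.drop 3))
    else data
  if !(!(data.getD "to".toList []).isEmpty && !(data.getD "subject".toList []).isEmpty
      && !(data.getD "body".toList []).isEmpty) then
    (none, some "Email command needs: to, subject, body. Example: email to a@b.com | subject Hi | body Hello")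
  else
    (some (data.items.map (fun kv => (String.ofList kv.1, String.ofList kv.2))), none)

-- ===== PRECONDITION & SPEC =====
def Spec_parse_email_command (command : String) (out : (Option (List (String × String))) × Option String) : Prop := out = parse_email_command_alt command
instance (command : String) (out : (Option (List (String × String))) × Option String) : Decidable (Spec_parse_email_command command out) := by unfold Spec_parse_email_command; infer_instance

-- ===== CLAIM (what is proved, stated in full; the proofs are below) =====
def Claim_equal_parse_email_command : Prop := ∀ (command : String), Dom_parse_email_command command → Spec_parse_email_command command (parse_email_command command)

-- ===== LEMMAS AND PROOFS =====

-- the five 'key ' prefixes are mutually non-prefixing, so at most one elif branch can fire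
lemma pvExcl {s a b : List Char} (h : PySem.Chars.startswith s a = true)
    (hab : ¬ a <+: b) (hba : ¬ b <+: a) : PySem.Chars.startswith s b = false := by
  rw [Bool.eq_false_iff]
  intro hb
  rcases List.prefix_or_prefix_of_prefix ((PySem.Chars.startswith_iff _ _).mp h)
      ((PySem.Chars.startswith_iff _ _).mp hb) with h' | h'
  exacts [hab h', hba h']

-- one fold step equals prepending the new part to every field's backward scan
lemma pvStepA_scan (rev : List (List Char)) (p : List Char) :
    pvStepA ⟨pvFields.map (fun k => (k, pvScan rev (k ++ [' '])))⟩ p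
      = ⟨pvFields.map (fun k => (k, pvScan (p :: rev) (k ++ [' '])))⟩ := by
  have e1 : "to".toList ++ [' '] = "to ".toList := by decide
  have e2 : "subject".toList ++ [' '] = "subject ".toList := by decide
  have e3 : "body".toList ++ [' '] = "body ".toList := by decide
  have e4 : "cc".toList ++ [' '] = "cc ".toList := by decide
  have e5 : "bcc".toList ++ [' '] = "bcc ".toList := by decide
  simp only [pvFields, List.map_cons, List.map_nil, e1, e2, e3, e4, e5, pvScan, pvStepA]
  by_cases h1 : PySem.Chars.startswith (PySem.Chars.lower p) "to ".toList = true
  · have x2 := pvExcl h1 (by decide) (by decide) (b := "subject ".toList)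
    have x3 := pvExcl h1 (by decide) (by decide) (b := "body ".toList)
    have x4 := pvExcl h1 (by decide) (by decide) (b := "cc ".toList)
    have x5 := pvExcl h1 (by decide) (by decide) (b := "bcc ".toList)
    simp only [h1, x2, x3, x4, x5]
    rfl
  · have f1 : PySem.Chars.startswith (PySem.Chars.lower p) "to ".toList = false := by
      simpa using h1
    by_cases h2 : PySem.Chars.startswith (PySem.Chars.lower p) "subject ".toList = true
    · have x3 := pvExcl h2 (by decide) (by decide) (b := "body ".toList)
      have x4 := pvExcl h2 (by decide) (by decide) (b := "cc ".toList)
      have x5 := pvExcl h2 (by decide) (by decide) (b := "bcc ".toList)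
      simp only [f1, h2, x3, x4, x5]
      rfl
    · have f2 : PySem.Chars.startswith (PySem.Chars.lower p) "subject ".toList = false := by
        simpa using h2
      by_cases h3 : PySem.Chars.startswith (PySem.Chars.lower p) "body ".toList = true
      · have x4 := pvExcl h3 (by decide) (by decide) (b := "cc ".toList)
        have x5 := pvExcl h3 (by decide) (by decide) (b := "bcc ".toList)
        simp only [f1, f2, h3, x4, x5]
        rfl
      · have f3 : PySem.Chars.startswith (PySem.Chars.lower p) "body ".toList = false := by
          simpa using h3
        by_cases h4 : PySem.Chars.startswith (PySem.Chars.lower p) "cc ".toList = true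
        · have x5 := pvExcl h4 (by decide) (by decide) (b := "bcc ".toList)
          simp only [f1, f2, f3, h4, x5]
          rfl
        · have f4 : PySem.Chars.startswith (PySem.Chars.lower p) "cc ".toList = false := by
            simpa using h4
          by_cases h5 : PySem.Chars.startswith (PySem.Chars.lower p) "bcc ".toList = true
          · simp only [f1, f2, f3, f4, h5]
            rfl
          · have f5 : PySem.Chars.startswith (PySem.Chars.lower p) "bcc ".toList = false := by
              simpa using h5
            simp only [f1, f2, f3, f4, f5]
            rfl

-- A's whole fold equals B's five backward scans
lemma pvFoldA_eq (L : List (List Char)) :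
    L.foldl pvStepA
        ⟨[("to".toList, []), ("subject".toList, []), ("body".toList, []), ("cc".toList, []), ("bcc".toList, [])]⟩
      = ⟨pvFields.map (fun k => (k, pvScan L.reverse (k ++ [' '])))⟩ := by
  induction L using List.reverseRecOn with
  | nil => rfl
  | append_singleton L p ih =>
    rw [List.foldl_append, List.foldl_cons, List.foldl_nil, ih,
        List.reverse_append, List.reverse_singleton, List.singleton_append,
        pvStepA_scan]

-- ===== VERDICT (by name: the statement is the Claim_ definition above) =====
theorem parse_email_command_spec : Claim_equal_parse_email_command := by
  intro command _
  unfold Spec_parse_email_command parse_email_command parse_email_command_alt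
  dsimp only
  rw [pvFoldA_eq]
  simp only [Bool.not_and, Bool.not_not, Bool.or_assoc]
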